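-- pv_equiv track=rewrite | github.com/Lee-dong-ho/Study | Programmers_Test/python_project/Immigration.py | solution
-- ===== SOURCE A (Python) =====
-- def solution(n, times):
--     answer = 0
--     left = 1
--     right = max(times)*n
--     while left <= right:
--         p = 0
--         mid = (left + right) // 2
--         for t in times:
--             p += mid // t
--             if p >= n:
--                 break
--         if p >= n:
--             answer = mid
--             right = mid -1
--         else:
--             left = mid + 1
--     return answer
-- ===== SOURCE B (Python) =====
-- def solution(n, times):
--     if n <= 0:
--         return 0
--     # Fast-forward: L is the largest time at which strictly fewer than n people are done,
--     # by the exact harmonic bound  sum(L//t) * P <= L * H < n * P  with P = prod(times).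
--     P = 1
--     for t in times:
--         P *= t
--     H = sum(P // t for t in times)
--     L = (n * P - 1) // H
--     served = sum(L // t for t in times)
--     # Serve the remaining people one at a time at the earliest next finish time.
--     counters = [[(L // t + 1) * t, t] for t in times]
--     finish = 0
--     for _ in range(n - served):
--         c = min(counters, key=lambda c: c[0])
--         finish = c[0]
--         c[0] += c[1]
--     return finish
-- ===== Notes on version B (the rewrite author's own statement) =====
-- stated objective: alternative
-- what changed: Replaces A's binary search over the answer space (midpoint bisection with an early-break capacity count) by a direct simulation of the counters: an exact harmonic fast-forward (product/sum big-integer bound) jumps to a time L at which fewer than n people are done, then the few remaining people are served one at a time by popping the counter with the smallest next finish time.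
-- outside the precondition, e.g. on solution(2, [3, -2]): A returns 6, B returns -14; on solution(-1, [-1]): A returns 1, B returns 0; on solution(1, [0]): A returns 0, B raises ZeroDivisionError
import Mathlib
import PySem

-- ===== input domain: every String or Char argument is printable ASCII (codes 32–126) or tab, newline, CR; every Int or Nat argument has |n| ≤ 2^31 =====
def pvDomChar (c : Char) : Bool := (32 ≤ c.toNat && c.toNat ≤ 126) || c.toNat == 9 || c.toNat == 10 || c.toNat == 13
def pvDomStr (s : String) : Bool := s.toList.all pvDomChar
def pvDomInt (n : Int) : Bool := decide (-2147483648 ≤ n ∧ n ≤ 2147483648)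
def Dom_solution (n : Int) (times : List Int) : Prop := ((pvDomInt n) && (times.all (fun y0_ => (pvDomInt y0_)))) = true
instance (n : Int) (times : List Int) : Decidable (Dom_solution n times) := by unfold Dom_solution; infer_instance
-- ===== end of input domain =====

-- B replaces A's answer-space binary search by a direct simulation of the counters: an exact
-- harmonic fast-forward to a time L serving fewer than n people, then popping the counter with
-- the smallest next finish time for the few remaining people (objective: alternative).
-- The Nat 'fuel' arguments of the loop ports bound the number of iterations the Python loops
-- perform, so the fuel-exhausted branch is never the one that returns.

-- ===== PORT A =====
-- 'for t in times: p += mid // t; if p >= n: break'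
def aCount (n mid : Int) : List Int → Int → Int
  | [], p => p
  | t :: ts, p =>
    let p' := p + PySem.Int.floordiv mid t
    if n ≤ p' then p' else aCount n mid ts p'

-- 'while left <= right: …'; fuel ≥ interval length suffices (each step discards ≥ 1 candidate)
def aLoop (n : Int) (times : List Int) : Nat → Int → Int → Int → Int
  | 0, _, _, answer => answer
  | fuel + 1, left, right, answer =>
    if left ≤ right then
      if n ≤ aCount n (PySem.Int.floordiv (left + right) 2) times 0 then
        aLoop n times fuel left (PySem.Int.floordiv (left + right) 2 - 1)
          (PySem.Int.floordiv (left + right) 2)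
      else aLoop n times fuel (PySem.Int.floordiv (left + right) 2 + 1) right answer
    else answer

def solution (n : Int) (times : List Int) : Int :=
  aLoop n times ((((PySem.List.max? times (fun t => t)).getD 0) * n).toNat) 1
    (((PySem.List.max? times (fun t => t)).getD 0) * n) 0

-- ===== PORT B =====
-- 'c[0] += c[1]' after 'c = min(counters, key=lambda c: c[0])': Python's min returns the first
-- minimal element, so the mutation hits the first pair whose fst equals the minimal value.
def bBump (v : Int) : List (Int × Int) → List (Int × Int)
  | [] => []
  | (f, t) :: rest => if f = v then (f + t, t) :: rest else (f, t) :: bBump v rest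

-- 'for _ in range(n - served): …'; the none branch is where Python's min([]) would raise —
-- under Pre_solution the counters list is nonempty, so it is never taken.
def bLoop : Nat → List (Int × Int) → Int → Int
  | 0, _, finish => finish
  | fuel + 1, counters, finish =>
    match PySem.List.min? counters (fun c => c.1) with
    | none => finish
    | some c => bLoop fuel (bBump c.1 counters) c.1

-- the body after the 'if n <= 0' early return: harmonic fast-forward, then pop the counters
def bMain (n : Int) (times : List Int) : Int :=
  let P := times.foldl (fun a t => a * t) 1
  let H := (times.map (fun t => PySem.Int.floordiv P t)).sum
  let L := PySem.Int.floordiv (n * P - 1) H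
  let served := (times.map (fun t => PySem.Int.floordiv L t)).sum
  bLoop (n - served).toNat
    (times.map (fun t => ((PySem.Int.floordiv L t + 1) * t, t))) 0

def solution_alt (n : Int) (times : List Int) : Int :=
  if n ≤ 0 then 0 else bMain n times

-- ===== PRECONDITION & SPEC =====
-- Pre_ keeps the problem's natural domain — a nonempty times list that is all positive, or a
-- degenerate request n ≤ 0 whenever A answers it with 0 (n = 0, or some time is nonnegative).
-- Excluded: the empty list (A raises ValueError), a zero time reached by the search
-- (ZeroDivisionError), and n ≥ 1 with a nonpositive time or n < 0 with all-negative times, where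
-- A's returned values (bisection residue of a non-monotone count) are implementation artefacts.
def Pre_solution (n : Int) (times : List Int) : Prop :=
  times ≠ [] ∧ ((∀ t ∈ times, 1 ≤ t) ∨ (n ≤ 0 ∧ (n = 0 ∨ ∃ t ∈ times, 0 ≤ t)))
instance (n : Int) (times : List Int) : Decidable (Pre_solution n times) := by unfold Pre_solution; infer_instance

def pvWitness_solution : Int × List Int := (6, [7, 10])

def Spec_solution (n : Int) (times : List Int) (out : Int) : Prop := out = solution_alt n times
instance (n : Int) (times : List Int) (out : Int) : Decidable (Spec_solution n times out) := by unfold Spec_solution; infer_instance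

-- ===== CLAIM (what is proved, stated in full; the proofs are below) =====
def Claim_equal_solution : Prop := ∀ (n : Int) (times : List Int), Dom_solution n times → Pre_solution n times → Spec_solution n times (solution n times)

-- ===== LEMMAS AND PROOFS =====

-- the full capacity count both programs are about: Σ_t T // t
def cntSum (times : List Int) (T : Int) : Int :=
  (times.map (fun t => PySem.Int.floordiv T t)).sum

theorem cntSum_zero (times : List Int) (hpos : ∀ t ∈ times, 1 ≤ t) :
    cntSum times 0 = 0 := by
  unfold cntSum
  induction times with
  | nil => simp
  | cons t ts ih =>
    have ht := hpos t (by simp)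
    have : PySem.Int.floordiv 0 t = 0 := by
      rw [PySem.Int.floordiv_eq_ediv_of_pos (by omega)]; simp
    simp [this, ih (fun x hx => hpos x (by simp [hx]))]

theorem cntSum_mono (times : List Int) (hpos : ∀ t ∈ times, 1 ≤ t)
    {S T : Int} (hST : S ≤ T) : cntSum times S ≤ cntSum times T := by
  unfold cntSum
  induction times with
  | nil => simp
  | cons t ts ih =>
    have ht := hpos t (by simp)
    have h1 : PySem.Int.floordiv S t ≤ PySem.Int.floordiv T t := by
      rw [PySem.Int.floordiv_eq_ediv_of_pos (by omega),
          PySem.Int.floordiv_eq_ediv_of_pos (by omega)]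
      exact Int.ediv_le_ediv (by omega) hST
    have h2 := ih (fun x hx => hpos x (by simp [hx]))
    simp only [List.map_cons, List.sum_cons]
    omega

theorem cntSum_nonpos (times : List Int) (hpos : ∀ t ∈ times, 1 ≤ t)
    {T : Int} (hT : T ≤ 0) : cntSum times T ≤ 0 := by
  have := cntSum_mono times hpos hT
  rw [cntSum_zero times hpos] at this
  exact this

-- the slowest counter alone serves n people by time max*n
theorem cntSum_bound (times : List Int) (hpos : ∀ t ∈ times, 1 ≤ t)
    {mx n : Int} (hmx : PySem.List.max? times (fun t => t) = some mx) (hn : 0 ≤ n) :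
    n ≤ cntSum times (mx * n) := by
  have hmem : mx ∈ times := PySem.List.max?_mem hmx
  have hmx1 : 1 ≤ mx := hpos mx hmem
  unfold cntSum
  have hterm : PySem.Int.floordiv (mx * n) mx = n := by
    rw [PySem.Int.floordiv_eq_ediv_of_pos (by omega)]
    rw [mul_comm]
    exact Int.mul_ediv_cancel n (by omega)
  have hmemmap : n ∈ times.map (fun t => PySem.Int.floordiv (mx * n) t) := by
    have h0 : PySem.Int.floordiv (mx * n) mx ∈ times.map (fun t => PySem.Int.floordiv (mx * n) t) := by
      simpa using List.mem_map_of_mem (f := fun t => PySem.Int.floordiv (mx * n) t) hmem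
    rwa [hterm] at h0
  refine List.single_le_sum ?_ _ hmemmap
  intro x hx
  rcases List.mem_map.mp hx with ⟨t, ht, rfl⟩
  have ht1 := hpos t ht
  rw [PySem.Int.floordiv_eq_ediv_of_pos (by omega)]
  exact Int.ediv_nonneg (by positivity) (by omega)

-- A's early-break count reaches n iff the full sum does
theorem aCount_ge_iff (n mid : Int) (hmid : 0 ≤ mid) :
    ∀ (ts : List Int) (p : Int), (∀ t ∈ ts, 1 ≤ t) →
      (n ≤ aCount n mid ts p ↔ n ≤ p + (ts.map (fun t => PySem.Int.floordiv mid t)).sum) := by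
  intro ts
  induction ts with
  | nil => intro p _; simp [aCount]
  | cons t ts ih =>
    intro p hpos
    have ht := hpos t (by simp)
    have hnn : 0 ≤ (ts.map (fun t => PySem.Int.floordiv mid t)).sum := by
      apply List.sum_nonneg
      intro x hx
      rcases List.mem_map.mp hx with ⟨u, hu, rfl⟩
      have hu1 := hpos u (by simp [hu])
      rw [PySem.Int.floordiv_eq_ediv_of_pos (by omega)]
      exact Int.ediv_nonneg hmid (by omega)
    simp only [aCount, List.map_cons, List.sum_cons]
    split_ifs with h
    · constructor
      · intro _; omega
      · intro _; exact h
    · rw [ih (p + PySem.Int.floordiv mid t) (fun x hx => hpos x (by simp [hx]))]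
      omega

theorem aLoop_none (n : Int) (times : List Int) (hpos : ∀ t ∈ times, 1 ≤ t) :
    ∀ (fuel : Nat) (l r ans : Int), 1 ≤ l →
      (∀ T, l ≤ T → T ≤ r → ¬ n ≤ cntSum times T) →
      aLoop n times fuel l r ans = ans := by
  intro fuel
  induction fuel with
  | zero => intro l r ans _ _; rfl
  | succ k ih =>
    intro l r ans hl hno
    by_cases h : l ≤ r
    · rw [aLoop, if_pos h]
      have hb := PySem.Int.floordiv_two_mid_bounds h
      have hnomid : ¬ n ≤ aCount n (PySem.Int.floordiv (l + r) 2) times 0 := by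
        intro hc
        have : n ≤ cntSum times (PySem.Int.floordiv (l + r) 2) := by
          unfold cntSum
          have := (aCount_ge_iff n (PySem.Int.floordiv (l + r) 2) (by omega) times 0 hpos).mp hc
          omega
        exact hno _ hb.1 hb.2 this
      rw [if_neg hnomid]
      exact ih _ r ans (by omega) (fun T h1 h2 => hno T (by omega) h2)
    · rw [aLoop, if_neg h]

theorem aLoop_least (n : Int) (times : List Int) (hpos : ∀ t ∈ times, 1 ≤ t) :
    ∀ (fuel : Nat) (l r ans : Int), (r - l + 1).toNat ≤ fuel → 1 ≤ l →
      (∀ T, T < l → ¬ n ≤ cntSum times T) →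
      (∃ T, l ≤ T ∧ T ≤ r ∧ n ≤ cntSum times T) →
      n ≤ cntSum times (aLoop n times fuel l r ans) ∧
        ∀ S, n ≤ cntSum times S → aLoop n times fuel l r ans ≤ S := by
  intro fuel
  induction fuel with
  | zero =>
    intro l r ans hf _ _ hex
    exfalso
    rcases hex with ⟨T, h1, h2, _⟩
    omega
  | succ k ih =>
    intro l r ans hf hl hlow hex
    have hlr : l ≤ r := by rcases hex with ⟨T, h1, h2, _⟩; omega
    have hb := PySem.Int.floordiv_two_mid_bounds hlr
    rw [aLoop, if_pos hlr]
    by_cases hpn : n ≤ aCount n (PySem.Int.floordiv (l + r) 2) times 0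
    · rw [if_pos hpn]
      have hmid : n ≤ cntSum times (PySem.Int.floordiv (l + r) 2) := by
        unfold cntSum
        have := (aCount_ge_iff n (PySem.Int.floordiv (l + r) 2) (by omega) times 0 hpos).mp hpn
        omega
      by_cases hex2 : ∃ T, l ≤ T ∧ T ≤ PySem.Int.floordiv (l + r) 2 - 1 ∧ n ≤ cntSum times T
      · exact ih l _ _ (by omega) hl hlow hex2
      · have heq : aLoop n times k l (PySem.Int.floordiv (l + r) 2 - 1)
            (PySem.Int.floordiv (l + r) 2) = PySem.Int.floordiv (l + r) 2 :=
          aLoop_none n times hpos k l _ _ hl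
            (fun T h1 h2 hT => hex2 ⟨T, h1, h2, hT⟩)
        rw [heq]
        refine ⟨hmid, fun S hS => ?_⟩
        by_cases hSl : S < l
        · exact absurd hS (hlow S hSl)
        · by_cases hSm : S ≤ PySem.Int.floordiv (l + r) 2 - 1
          · exact absurd hS (fun hS => hex2 ⟨S, by omega, hSm, hS⟩)
          · omega
    · rw [if_neg hpn]
      have hnomid : ¬ n ≤ cntSum times (PySem.Int.floordiv (l + r) 2) := by
        intro hc
        apply hpn
        unfold cntSum at hc
        exact (aCount_ge_iff n (PySem.Int.floordiv (l + r) 2) (by omega) times 0 hpos).mpr (by omega)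
      have hlow' : ∀ T, T < PySem.Int.floordiv (l + r) 2 + 1 → ¬ n ≤ cntSum times T := by
        intro T hT hc
        exact hnomid (le_trans hc (cntSum_mono times hpos (by omega)))
      apply ih _ r ans (by omega) (by omega) hlow'
      rcases hex with ⟨T, h1, h2, hT⟩
      refine ⟨T, ?_, h2, hT⟩
      by_contra hc
      exact hlow' T (by omega) hT

-- ===== B-side simulation invariant =====

-- (f, t) is a live counter entry at time 'finish': f is its k-th finish time (k ≥ 1), the
-- (k-1)-st finish time has already passed (≤ finish) and f itself has not (finish ≤ f)
def GoodPair (finish : Int) (c : Int × Int) : Prop :=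
  1 ≤ c.2 ∧ c.2 ∣ c.1 ∧ c.2 ≤ c.1 ∧ c.1 - c.2 ≤ finish ∧ finish ≤ c.1

-- state in which m people have been served by time 'finish'
def InvB (times : List Int) (cs : List (Int × Int)) (finish m : Int) : Prop :=
  cs.map Prod.snd = times ∧ (∀ c ∈ cs, GoodPair finish c) ∧
  (cs.map (fun c => c.1 / c.2 - 1)).sum = m

-- the m-th person was served exactly at time 'finish': some entry was just bumped past it
def WitB (cs : List (Int × Int)) (finish : Int) : Prop :=
  1 ≤ finish ∧ ∃ c ∈ cs, c.1 = finish + c.2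

theorem prod_one_le (l : List Int) (h : ∀ t ∈ l, 1 ≤ t) : 1 ≤ l.prod := by
  induction l with
  | nil => simp
  | cons t ts ih =>
    have ht := h t (by simp)
    have hts := ih (fun x hx => h x (by simp [hx]))
    rw [List.prod_cons]
    nlinarith

theorem bBump_props (v finish : Int) (hfv : finish ≤ v) :
    ∀ (cs : List (Int × Int)), (∀ c ∈ cs, GoodPair finish c) →
      (∀ c ∈ cs, v ≤ c.1) → (∃ c ∈ cs, c.1 = v) →
      (bBump v cs).map Prod.snd = cs.map Prod.snd ∧
      ((bBump v cs).map (fun c => c.1 / c.2 - 1)).sum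
        = (cs.map (fun c => c.1 / c.2 - 1)).sum + 1 ∧
      (∀ c ∈ bBump v cs, GoodPair v c) ∧
      (∃ c ∈ bBump v cs, c.1 = v + c.2) := by
  intro cs
  induction cs with
  | nil => intro _ _ hex; rcases hex with ⟨c, hc, _⟩; simp at hc
  | cons c0 cs ih =>
    intro hgood hmin hex
    obtain ⟨f, t⟩ := c0
    have hg0 := hgood (f, t) (by simp)
    obtain ⟨ht1, htdvd, htle, hle1, hle2⟩ := hg0
    simp only at ht1 htdvd htle hle1 hle2
    by_cases hfveq : f = v
    · subst hfveq
      have hstep : (f + t) / t = f / t + 1 := by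
        have : f + t = f + 1 * t := by ring
        rw [this, Int.add_mul_ediv_right _ _ (by omega : t ≠ 0)]
      have hb : bBump f ((f, t) :: cs) = (f + t, t) :: cs := by simp [bBump]
      rw [hb]
      refine ⟨rfl, ?_, ?_, ?_⟩
      · simp only [List.map_cons, List.sum_cons]
        rw [hstep]; ring
      · intro c hc
        rcases List.mem_cons.mp hc with rfl | hc
        · exact ⟨ht1, dvd_add htdvd dvd_rfl, by omega, by simpa using hfv, by omega⟩
        · obtain ⟨h1, h2, h3, h4, h5⟩ := hgood c (by simp [hc])
          exact ⟨h1, h2, h3, by have := hmin c (by simp [hc]); omega,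
            hmin c (by simp [hc])⟩
      · exact ⟨(f + t, t), by simp, rfl⟩
    · have hrest : ∃ c ∈ cs, c.1 = v := by
        rcases hex with ⟨c, hc, hcv⟩
        rcases List.mem_cons.mp hc with rfl | hc
        · exact absurd hcv hfveq
        · exact ⟨c, hc, hcv⟩
      obtain ⟨e1, e2, e3, e4⟩ := ih (fun c hc => hgood c (by simp [hc]))
        (fun c hc => hmin c (by simp [hc])) hrest
      refine ⟨?_, ?_, ?_, ?_⟩
      · simp only [bBump, if_neg hfveq, List.map_cons, e1]
      · simp only [bBump, if_neg hfveq, List.map_cons, List.sum_cons, e2]; ring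
      · simp only [bBump, if_neg hfveq]
        intro c hc
        rcases List.mem_cons.mp hc with rfl | hc
        · exact ⟨ht1, htdvd, htle, by have := hmin (f, t) (by simp); omega,
            hmin (f, t) (by simp)⟩
        · exact e3 c hc
      · rcases e4 with ⟨c, hc, hcv⟩
        exact ⟨c, by simp [bBump, if_neg hfveq, hc], hcv⟩

theorem invB_step (times : List Int) (cs : List (Int × Int)) (finish m : Int)
    (hinv : InvB times cs finish m) (c0 : Int × Int)
    (hmin : PySem.List.min? cs (fun c => c.1) = some c0) :
    InvB times (bBump c0.1 cs) c0.1 (m + 1) ∧ WitB (bBump c0.1 cs) c0.1 := by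
  obtain ⟨hsnd, hgood, hsum⟩ := hinv
  have hc0mem : c0 ∈ cs := PySem.List.min?_mem hmin
  have hc0min : ∀ c ∈ cs, c0.1 ≤ c.1 := fun c hc => PySem.List.min?_isMin hmin c hc
  have hg0 := hgood c0 hc0mem
  obtain ⟨g1, g2, g3, g4, g5⟩ := hg0
  obtain ⟨e1, e2, e3, e4⟩ := bBump_props c0.1 finish g5 cs hgood hc0min ⟨c0, hc0mem, rfl⟩
  exact ⟨⟨by rw [e1, hsnd], e3, by rw [e2, hsum]⟩, ⟨by omega, e4⟩⟩

theorem bLoop_run (times : List Int) (htne : times ≠ []) :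
    ∀ (fuel : Nat) (cs : List (Int × Int)) (finish m : Int), InvB times cs finish m →
      ∃ cs', InvB times cs' (bLoop (fuel + 1) cs finish) (m + fuel + 1) ∧
        WitB cs' (bLoop (fuel + 1) cs finish) := by
  intro fuel
  induction fuel with
  | zero =>
    intro cs finish m hinv
    have hcsne : cs ≠ [] := by
      intro hc; apply htne; rw [← hinv.1, hc]; rfl
    obtain ⟨c0, hc0⟩ : ∃ c0, PySem.List.min? cs (fun c => c.1) = some c0 := by
      cases h : PySem.List.min? cs (fun c => c.1) with
      | none => exact absurd ((PySem.List.min?_eq_none_iff _ _).mp h) hcsne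
      | some c => exact ⟨c, rfl⟩
    rw [bLoop, hc0]
    obtain ⟨hinv', hwit'⟩ := invB_step times cs finish m hinv c0 hc0
    exact ⟨bBump c0.1 cs, by simpa [bLoop] using hinv', by simpa [bLoop] using hwit'⟩
  | succ k ih =>
    intro cs finish m hinv
    have hcsne : cs ≠ [] := by
      intro hc; apply htne; rw [← hinv.1, hc]; rfl
    obtain ⟨c0, hc0⟩ : ∃ c0, PySem.List.min? cs (fun c => c.1) = some c0 := by
      cases h : PySem.List.min? cs (fun c => c.1) with
      | none => exact absurd ((PySem.List.min?_eq_none_iff _ _).mp h) hcsne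
      | some c => exact ⟨c, rfl⟩
    rw [show k + 1 + 1 = (k + 1) + 1 from rfl, bLoop, hc0]
    obtain ⟨hinv', _⟩ := invB_step times cs finish m hinv c0 hc0
    obtain ⟨cs', h1, h2⟩ := ih (bBump c0.1 cs) c0.1 (m + 1) hinv'
    exact ⟨cs', by rw [show m + 1 + k + 1 = m + (k + 1) + 1 by ring] at h1; exact h1, h2⟩

-- the first pop ignores the incoming 'finish' value, so the dummy 0 can be replaced
theorem bLoop_finish_irrel (cs : List (Int × Int)) (fuel : Nat) (f1 f2 : Int)
    (hcsne : cs ≠ []) : bLoop (fuel + 1) cs f1 = bLoop (fuel + 1) cs f2 := by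
  obtain ⟨c0, hc0⟩ : ∃ c0, PySem.List.min? cs (fun c => c.1) = some c0 := by
    cases h : PySem.List.min? cs (fun c => c.1) with
    | none => exact absurd ((PySem.List.min?_eq_none_iff _ _).mp h) hcsne
    | some c => exact ⟨c, rfl⟩
  rw [bLoop, bLoop, hc0]

-- a state reached by a pop pins its finish time as the least time serving m people
theorem invB_extract (times : List Int) (cs : List (Int × Int)) (V m : Int)
    (hinv : InvB times cs V m) (hwit : WitB cs V) :
    m ≤ cntSum times V ∧ cntSum times (V - 1) < m := by
  obtain ⟨hsnd, hgood, hsum⟩ := hinv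
  obtain ⟨hV1, cw, hcw, hcwv⟩ := hwit
  constructor
  · -- m = Σ (k-1) ≤ Σ V // t
    rw [← hsum]
    unfold cntSum
    rw [← hsnd, List.map_map]
    apply List.sum_le_sum
    intro c hc
    obtain ⟨h1, h2, h3, h4, h5⟩ := hgood c hc
    simp only [Function.comp]
    rw [PySem.Int.floordiv_eq_ediv_of_pos (by omega)]
    have hk : (c.1 / c.2) * c.2 = c.1 := Int.ediv_mul_cancel h2
    rw [Int.le_ediv_iff_mul_le (by omega)]
    nlinarith [hk]
  · -- Σ (V-1) // t < Σ (k-1) = m, strictly smaller at the just-bumped entry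
    rw [← hsum]
    unfold cntSum
    rw [← hsnd, List.map_map]
    apply List.sum_lt_sum
    · intro c hc
      obtain ⟨h1, h2, h3, h4, h5⟩ := hgood c hc
      simp only [Function.comp]
      rw [PySem.Int.floordiv_eq_ediv_of_pos (by omega)]
      have hk : (c.1 / c.2) * c.2 = c.1 := Int.ediv_mul_cancel h2
      have : (V - 1) / c.2 < c.1 / c.2 := by
        rw [Int.ediv_lt_iff_lt_mul (by omega)]
        omega
      omega
    · refine ⟨cw, hcw, ?_⟩
      obtain ⟨h1, h2, h3, h4, h5⟩ := hgood cw hcw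
      simp only [Function.comp]
      rw [PySem.Int.floordiv_eq_ediv_of_pos (by omega)]
      have hdVt : cw.2 ∣ V + cw.2 := hcwv ▸ h2
      have hdV : cw.2 ∣ V := by
        have := dvd_sub hdVt (dvd_refl cw.2)
        simpa using this
      obtain ⟨q, hq⟩ := hdV
      have hqc : q * cw.2 = V := by rw [mul_comm]; exact hq.symm
      have hVq : V / cw.2 = q := by rw [hq]; exact Int.mul_ediv_cancel_left _ (by omega)
      have hk2 : cw.1 / cw.2 = q + 1 := by
        rw [hcwv, hq, show cw.2 * q + cw.2 = (q + 1) * cw.2 by ring,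
          Int.mul_ediv_cancel _ (by omega)]
      have hlt : (V - 1) / cw.2 < q := by
        rw [Int.ediv_lt_iff_lt_mul (by omega)]
        omega
      omega

-- bMain's result is the least time at which n people are served (n ≥ 1, positive times)
theorem bMain_least (n : Int) (times : List Int) (hpos : ∀ t ∈ times, 1 ≤ t)
    (hne : times ≠ []) (hn1 : 1 ≤ n) :
    n ≤ cntSum times (bMain n times) ∧ cntSum times (bMain n times - 1) < n := by
  simp only [bMain]
  set P := times.foldl (fun a t => a * t) 1 with hPdef
  set H := (times.map (fun t => PySem.Int.floordiv P t)).sum with hHdef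
  set L := PySem.Int.floordiv (n * P - 1) H with hLdef
  set served := (times.map (fun t => PySem.Int.floordiv L t)).sum with hSdef
  have hPprod : P = times.prod := by
    rw [hPdef, List.prod_eq_foldl]
  have hP1 : 1 ≤ P := by
    rw [hPprod]
    exact prod_one_le times hpos
  have hdvdP : ∀ t ∈ times, t ∣ P := by
    intro t ht; rw [hPprod]; exact List.dvd_prod ht
  have hu1 : ∀ t ∈ times, 1 ≤ P / t := by
    intro t ht
    obtain ⟨u, hu⟩ := hdvdP t ht
    have ht1 := hpos t ht
    have : P / t = u := by rw [hu]; exact Int.mul_ediv_cancel_left _ (by omega)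
    rw [this]
    nlinarith [hu]
  have hHfd : H = (times.map (fun t => P / t)).sum := by
    rw [hHdef]
    congr 1
    apply List.map_congr_left
    intro t ht
    exact PySem.Int.floordiv_eq_ediv_of_pos (by have := hpos t ht; omega)
  have hH1 : 1 ≤ H := by
    obtain ⟨t0, ht0⟩ := List.exists_mem_of_ne_nil times hne
    rw [hHfd]
    have hmem : P / t0 ∈ times.map (fun t => P / t) := List.mem_map_of_mem ht0
    have := List.single_le_sum (l := times.map (fun t => P / t))
      (by intro x hx; rcases List.mem_map.mp hx with ⟨t, ht, rfl⟩
          have := hu1 t ht; omega) _ hmem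
    have := hu1 t0 ht0
    omega
  have hLfd : L = (n * P - 1) / H := by
    rw [hLdef]; exact PySem.Int.floordiv_eq_ediv_of_pos (by omega)
  have hnP1 : 1 ≤ n * P := by nlinarith
  have hL0 : 0 ≤ L := by
    rw [hLfd]; exact Int.ediv_nonneg (by omega) (by omega)
  have hSfd : served = (times.map (fun t => L / t)).sum := by
    rw [hSdef]
    congr 1
    apply List.map_congr_left
    intro t ht
    exact PySem.Int.floordiv_eq_ediv_of_pos (by have := hpos t ht; omega)
  -- served * P ≤ L * H < n * P, hence served < n
  have hLH : L * H ≤ n * P - 1 := by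
    rw [hLfd]
    have := (Int.le_ediv_iff_mul_le (a := (n * P - 1) / H) (b := n * P - 1)
      (by omega : (0:Int) < H)).mp le_rfl
    omega
  have hsP : served * P ≤ L * H := by
    rw [hSfd, hHfd, ← List.sum_map_mul_right, ← List.sum_map_mul_left]
    apply List.sum_le_sum
    intro t ht
    have ht1 := hpos t ht
    obtain ⟨u, hu⟩ := hdvdP t ht
    have huq : P / t = u := by rw [hu]; exact Int.mul_ediv_cancel_left _ (by omega)
    have hu0 : 1 ≤ u := by nlinarith [hu]
    have hfl : L / t * t ≤ L :=
      (Int.le_ediv_iff_mul_le (by omega : (0:Int) < t)).mp le_rfl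
    calc L / t * P = (L / t * t) * u := by rw [hu]; ring
      _ ≤ L * u := by nlinarith
      _ = L * (P / t) := by rw [huq]
  have hserved : served < n := by
    have : served * P < n * P := by omega
    exact lt_of_mul_lt_mul_right this (by omega)
  -- the short simulation from time L
  have hinit : InvB times (times.map (fun t => ((PySem.Int.floordiv L t + 1) * t, t))) L served := by
    refine ⟨by simp [Function.comp_def], ?_, ?_⟩
    · intro c hc
      rcases List.mem_map.mp hc with ⟨t, ht, rfl⟩
      have ht1 := hpos t ht
      have hfd : PySem.Int.floordiv L t = L / t :=
        PySem.Int.floordiv_eq_ediv_of_pos (by omega)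
      have hq0 : 0 ≤ L / t := Int.ediv_nonneg hL0 (by omega)
      have hfl : L / t * t ≤ L :=
        (Int.le_ediv_iff_mul_le (by omega : (0:Int) < t)).mp le_rfl
      have hup : L < (L / t + 1) * t := by
        have := (Int.ediv_lt_iff_lt_mul (a := L) (b := L / t + 1)
          (by omega : (0:Int) < t)).mp (by omega)
        omega
      refine ⟨by simpa using ht1, ⟨L / t + 1, by rw [hfd]; ring⟩, ?_, ?_, ?_⟩
      · simp only [hfd]; nlinarith
      · simp only [hfd]; nlinarith
      · simp only [hfd]; omega
    · rw [hSfd]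
      rw [List.map_map]
      congr 1
      apply List.map_congr_left
      intro t ht
      have ht1 := hpos t ht
      have hfd : PySem.Int.floordiv L t = L / t :=
        PySem.Int.floordiv_eq_ediv_of_pos (by omega)
      simp only [Function.comp]
      rw [hfd, Int.mul_ediv_cancel _ (by omega : (t:Int) ≠ 0)]
      ring
  obtain ⟨k, hk⟩ : ∃ k, (n - served).toNat = k + 1 := ⟨(n - served).toNat - 1, by omega⟩
  have hcsne : times.map (fun t => ((PySem.Int.floordiv L t + 1) * t, t)) ≠ [] := by
    simpa using hne
  rw [hk, bLoop_finish_irrel _ k 0 L hcsne]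
  obtain ⟨cs', hinv', hwit'⟩ := bLoop_run times hne k
    (times.map (fun t => ((PySem.Int.floordiv L t + 1) * t, t))) L served hinit
  have hm : served + k + 1 = n := by omega
  rw [hm] at hinv'
  exact invB_extract times cs' _ n hinv' hwit'

theorem solution_eq_alt (n : Int) (times : List Int) (hpre : Pre_solution n times) :
    solution n times = solution_alt n times := by
  obtain ⟨hne, hdisj⟩ := hpre
  obtain ⟨mx, hmx⟩ : ∃ mx, PySem.List.max? times (fun t => t) = some mx := by
    cases h : PySem.List.max? times (fun t => t) with
    | none => exact absurd ((PySem.List.max?_eq_none_iff _ _).mp h) hne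
    | some m => exact ⟨m, rfl⟩
  unfold solution solution_alt
  rw [hmx]
  simp only [Option.getD_some]
  by_cases hn : n ≤ 0
  · -- both sides return 0: A's interval is empty (mx*n ≤ 0), B takes the early return
    have hmx0 : n = 0 ∨ 0 ≤ mx := by
      rcases hdisj with hpos | ⟨_, h0⟩
      · rcases List.exists_mem_of_ne_nil times hne with ⟨t, ht⟩
        exact Or.inr (by have h1 := hpos t ht; have h2 := PySem.List.max?_isMax hmx t ht; omega)
      · rcases h0 with h0 | ⟨t, ht, ht0⟩
        · exact Or.inl h0
        · exact Or.inr (le_trans ht0 (PySem.List.max?_isMax hmx t ht))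
    have hr : mx * n ≤ 0 := by
      rcases hmx0 with rfl | hmx0
      · simp
      · exact mul_nonpos_of_nonneg_of_nonpos hmx0 hn
    have hfuelA : (mx * n).toNat = 0 := by omega
    rw [hfuelA, if_pos hn]
    rfl
  · -- n ≥ 1: both sides compute the least T with cntSum times T ≥ n
    have hpos : ∀ t ∈ times, 1 ≤ t := by
      rcases hdisj with hpos | ⟨h0, _⟩
      · exact hpos
      · omega
    have hmx1 : 1 ≤ mx := hpos mx (PySem.List.max?_mem hmx)
    have hn1 : 1 ≤ n := by omega
    have hbig : n ≤ cntSum times (mx * n) := cntSum_bound times hpos hmx (by omega)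
    have hlow : ∀ T, T < 1 → ¬ n ≤ cntSum times T := by
      intro T hT hc
      have := cntSum_nonpos times hpos (T := T) (by omega)
      omega
    have hr1 : 1 ≤ mx * n := by nlinarith
    have hA := aLoop_least n times hpos ((mx * n).toNat) 1 (mx * n) 0 (by omega) le_rfl hlow
      ⟨mx * n, hr1, le_rfl, hbig⟩
    have hB := bMain_least n times hpos hne hn1
    rw [if_neg hn]
    have hVleast : ∀ S, n ≤ cntSum times S → bMain n times ≤ S := by
      intro S hS
      by_contra hc
      have : cntSum times S ≤ cntSum times (bMain n times - 1) := cntSum_mono times hpos (by omega)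
      omega
    have h1 : aLoop n times ((mx * n).toNat) 1 (mx * n) 0 ≤ bMain n times := hA.2 _ hB.1
    have h2 : bMain n times ≤ aLoop n times ((mx * n).toNat) 1 (mx * n) 0 := hVleast _ hA.1
    omega

-- ===== VERDICT (by name: the statement is the Claim_ definition above) =====
theorem solution_spec : Claim_equal_solution := by
  intro n times _ hpre
  unfold Spec_solution
  exact solution_eq_alt n times hpre
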